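-- pv_equiv track=rewrite | github.com/itaigat/pycharner | models/preprocess.py | create_string_type_tagging_word_base
-- ===== SOURCE A (Python) =====
-- def create_string_type_tagging_word_base(char_list):
--     """
--     :param char_list: list of characters
--     :return: a list with the characters types that are word based
--     """
--     char_type_list = []
--     temp_word_len = 0
--     temp_word_type = ''
--     for char in char_list:
--
--         if char == '_' or char == '\n':
--             char_type_list.extend(([temp_word_type] * temp_word_len) + ['_'] )
--             temp_word_len = 0
--             temp_word_type = ''
--             continue
--
--         if char.isupper():
--             if temp_word_type[-1:] != 'X':
--                 temp_word_type += 'X'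
--         elif char.islower():
--             if temp_word_type[-1:] != 'x':
--                 temp_word_type += 'x'
--         elif char.isdigit():
--             if temp_word_type[-1:] != 'd':
--                 temp_word_type += 'd'
--         else:
--             if temp_word_type[-1:] != char:
--                 temp_word_type += char
--
--         temp_word_len += 1
--
--     if len(char_type_list) != len(char_list):
--         print ("len(char_type_list) != len(char_list)")
--
--     return char_type_list
-- ===== SOURCE B (Python) =====
-- def create_string_type_tagging_word_base(char_list):
--     def sym(c):
--         if c.isupper():
--             return 'X'
--         if c.islower():
--             return 'x'
--         if c.isdigit():
--             return 'd'
--         return c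
--
--     def compress(syms):
--         pat = ''
--         for s in syms:
--             if pat[-1:] != s:
--                 pat += s
--         return pat
--
--     out = []
--     word = []  # symbols of the current (unterminated) word
--     for c in char_list:
--         if c == '_' or c == '\n':
--             out += [compress(word)] * len(word) + ['_']
--             word = []
--         else:
--             word.append(sym(c))
--     # trailing word without separator is intentionally not flushed (matches A)
--     if len(out) != len(char_list):
--         print("len(char_type_list) != len(char_list)")
--     return out
-- ===== Notes on version B (the rewrite author's own statement) =====
-- stated objective: idiomatic
-- what changed: B maps each char to a type symbol, collects the current word's symbols in a list, and compresses them into the pattern only when a separator arrives, instead of A's fused incremental string-building with per-branch dedup checks.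
import Mathlib
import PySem

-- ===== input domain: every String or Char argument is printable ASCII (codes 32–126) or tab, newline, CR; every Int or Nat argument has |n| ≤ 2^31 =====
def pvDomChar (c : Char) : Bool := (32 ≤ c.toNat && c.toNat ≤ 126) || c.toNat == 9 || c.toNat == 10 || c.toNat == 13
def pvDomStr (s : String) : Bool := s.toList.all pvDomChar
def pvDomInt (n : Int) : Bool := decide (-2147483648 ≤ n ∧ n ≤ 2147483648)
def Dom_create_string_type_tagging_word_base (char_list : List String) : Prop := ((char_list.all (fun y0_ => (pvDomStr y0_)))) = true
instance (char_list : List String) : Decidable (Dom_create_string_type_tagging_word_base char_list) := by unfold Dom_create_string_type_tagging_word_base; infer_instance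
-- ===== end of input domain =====

-- ===== PORT A =====
-- B changes only the decomposition (collect word symbols, compress at the separator); return value only —
-- A's final length-mismatch print (stdout side effect) is not modelled.
-- Python str.isupper / str.islower on full strings, exact on the ASCII Dom:
-- at least one cased (= alphabetic in ASCII) character and every cased character upper/lower.
def pyStrIsupper (s : String) : Bool :=
  s.toList.any PySem.Chars.isalpha && s.toList.all (fun c => !PySem.Chars.isalpha c || PySem.Chars.isupper c)

def pyStrIslower (s : String) : Bool :=
  s.toList.any PySem.Chars.isalpha && s.toList.all (fun c => !PySem.Chars.isalpha c || PySem.Chars.islower c)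

-- temp_word_type[-1:] : the last character as a (possibly empty) string, on List Char
def lastSlice (ty : List Char) : List Char := ty.drop (ty.length - 1)

def aStep : List String × Nat × List Char → String → List String × Nat × List Char
  | (ctl, n, ty), char =>
  if char = "_" ∨ char = "\n" then
    (ctl ++ List.replicate n (String.ofList ty) ++ ["_"], 0, [])
  else
    let ty' :=
      if pyStrIsupper char then (if lastSlice ty ≠ ['X'] then ty ++ ['X'] else ty)
      else if pyStrIslower char then (if lastSlice ty ≠ ['x'] then ty ++ ['x'] else ty)
      else if PySem.Chars.strIsdigit char.toList then (if lastSlice ty ≠ ['d'] then ty ++ ['d'] else ty)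
      else (if lastSlice ty ≠ char.toList then ty ++ char.toList else ty)
    (ctl, n + 1, ty')

def create_string_type_tagging_word_base (char_list : List String) : List String :=
  (char_list.foldl aStep ([], 0, [])).1

-- ===== PORT B =====
def symB (c : String) : List Char :=
  if pyStrIsupper c then ['X']
  else if pyStrIslower c then ['x']
  else if PySem.Chars.strIsdigit c.toList then ['d']
  else c.toList

def compressB (syms : List (List Char)) : List Char :=
  syms.foldl (fun pat s => if lastSlice pat ≠ s then pat ++ s else pat) []

def bStep (st : List String × List (List Char)) (c : String) : List String × List (List Char) :=
  if c = "_" ∨ c = "\n" then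
    (st.1 ++ List.replicate st.2.length (String.ofList (compressB st.2)) ++ ["_"], [])
  else
    (st.1, st.2 ++ [symB c])

def create_string_type_tagging_word_base_alt (char_list : List String) : List String :=
  (char_list.foldl bStep ([], [])).1

-- ===== PRECONDITION & SPEC =====
def Spec_create_string_type_tagging_word_base (char_list : List String) (out : List String) : Prop := out = create_string_type_tagging_word_base_alt char_list
instance (char_list : List String) (out : List String) : Decidable (Spec_create_string_type_tagging_word_base char_list out) := by unfold Spec_create_string_type_tagging_word_base; infer_instance

-- ===== CLAIM (what is proved, stated in full; the proofs are below) =====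
def Claim_equal_create_string_type_tagging_word_base : Prop := ∀ (char_list : List String), Dom_create_string_type_tagging_word_base char_list → Spec_create_string_type_tagging_word_base char_list (create_string_type_tagging_word_base char_list)

-- ===== LEMMAS AND PROOFS =====

-- B's deferred compression of the extended word equals one dedup step on the compressed word.
theorem compressB_snoc (word : List (List Char)) (s : List Char) :
    compressB (word ++ [s]) =
      if lastSlice (compressB word) ≠ s then compressB word ++ s else compressB word := by
  simp [compressB]

-- A's per-branch dedup step is the uniform dedup step on symB char.
theorem aStep_ty (ty : List Char) (char : String) :
    (if pyStrIsupper char then (if lastSlice ty ≠ ['X'] then ty ++ ['X'] else ty)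
     else if pyStrIslower char then (if lastSlice ty ≠ ['x'] then ty ++ ['x'] else ty)
     else if PySem.Chars.strIsdigit char.toList then (if lastSlice ty ≠ ['d'] then ty ++ ['d'] else ty)
     else (if lastSlice ty ≠ char.toList then ty ++ char.toList else ty))
    = (if lastSlice ty ≠ symB char then ty ++ symB char else ty) := by
  unfold symB
  split_ifs <;> rfl

-- Invariant: from related states, the two folds produce the same output list.
theorem fold_agree (l : List String) :
    ∀ (ctl : List String) (word : List (List Char)),
      (l.foldl aStep (ctl, word.length, compressB word)).1 = (l.foldl bStep (ctl, word)).1 := by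
  induction l with
  | nil => intro ctl word; rfl
  | cons c l ih =>
    intro ctl word
    by_cases hsep : c = "_" ∨ c = "\n"
    · simp only [List.foldl_cons, aStep, bStep, if_pos hsep]
      exact ih (ctl ++ List.replicate word.length (String.ofList (compressB word)) ++ ["_"]) []
    · have ea : aStep (ctl, word.length, compressB word) c
          = (ctl, (word ++ [symB c]).length, compressB (word ++ [symB c])) := by
        simp only [aStep]
        rw [if_neg hsep, aStep_ty, ← compressB_snoc]
        simp
      have eb : bStep (ctl, word) c = (ctl, word ++ [symB c]) := by
        unfold bStep
        rw [if_neg hsep]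
      rw [List.foldl_cons, List.foldl_cons, ea, eb]
      exact ih ctl (word ++ [symB c])

-- ===== VERDICT (by name: the statement is the Claim_ definition above) =====
theorem create_string_type_tagging_word_base_spec : Claim_equal_create_string_type_tagging_word_base := by
  intro char_list _
  unfold Spec_create_string_type_tagging_word_base create_string_type_tagging_word_base create_string_type_tagging_word_base_alt
  simpa using fold_agree char_list [] []
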